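-- pv_equiv track=rewrite | github.com/Iggybot6/MAT_211 | Cipher.py | caseChanger
-- ===== SOURCE A (Python) =====
-- def caseChanger(strIn, caps):
--     """
--     This function converts the case of all of the charactors in a string to either upper or lowercase.
--
--     "strIn" is the string you want to convert
--     "caps" is set to true to make the string capital, and false to make the string lowercase
--
--     The function returns a string all in the same case.
--     """
--     strOut = ""  # This string is where the coverted string is stored
--     for char in range(len(strIn)):
--         if caps is True:  # This converts to uppercase
--             if ord(strIn[char]) > 96:
--                 strOut += chr((ord(strIn[char]) - 32))
--             else:
--                 strOut += strIn[char]
--         if caps is False:  # This converts to lowercase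
--             if ord(strIn[char]) < 96 and ord(strIn[char]) != 32:
--                 strOut += chr((ord(strIn[char]) + 32))
--             else:
--                 strOut += strIn[char]
--     return strOut
-- ===== SOURCE B (Python) =====
-- def caseChanger(strIn, caps):
--     """Same conversion via a translation table over the distinct characters, applied in one str.translate pass."""
--     if caps is True:
--         table = {ord(c): ord(c) - 32 for c in set(strIn) if ord(c) > 96}
--         return strIn.translate(table)
--     if caps is False:
--         table = {ord(c): ord(c) + 32 for c in set(strIn) if ord(c) < 96 and ord(c) != 32}
--         return strIn.translate(table)
--     return strIn
-- ===== Notes on version B (the rewrite author's own statement) =====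
-- stated objective: faster
-- what changed: B branches on caps once, builds a translation table over the distinct characters (dict comprehension over set(strIn)) and applies it in one str.translate pass, instead of A's per-index loop that re-tests caps per character and grows the string by concatenation.
import Mathlib
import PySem

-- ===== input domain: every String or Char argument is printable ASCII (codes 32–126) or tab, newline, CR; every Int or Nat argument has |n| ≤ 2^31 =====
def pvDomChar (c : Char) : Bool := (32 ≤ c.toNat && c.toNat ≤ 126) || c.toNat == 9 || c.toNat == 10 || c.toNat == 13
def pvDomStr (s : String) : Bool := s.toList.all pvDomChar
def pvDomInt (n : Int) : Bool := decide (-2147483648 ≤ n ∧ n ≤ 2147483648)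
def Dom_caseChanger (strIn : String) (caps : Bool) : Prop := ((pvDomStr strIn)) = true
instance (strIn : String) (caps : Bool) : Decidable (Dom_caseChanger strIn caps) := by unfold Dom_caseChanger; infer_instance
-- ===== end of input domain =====

-- B replaces A's index loop with string concatenation by a translation table built once
-- over the distinct characters and a single mapped pass (Python str.translate); same output.


-- ===== PORT A =====
-- literal port: for char in range(len(strIn)): two successive 'if caps is True' / 'if caps is False'
-- blocks appending one character each to strOut (caps : Bool, so 'is True'/'is False' are caps = true/false)
def caseChanger (strIn : String) (caps : Bool) : String :=
  let cs := strIn.toList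
  String.ofList ((PySem.List.pyRange 0 (PySem.Str.len strIn) 1).foldl (fun strOut char =>
    let c := PySem.List.pyGetD cs char ' '
    let strOut := if caps = true then
        (if c.toNat > 96 then strOut ++ [Char.ofNat (c.toNat - 32)] else strOut ++ [c])
      else strOut
    if caps = false then
        (if c.toNat < 96 ∧ c.toNat ≠ 32 then strOut ++ [Char.ofNat (c.toNat + 32)] else strOut ++ [c])
      else strOut) [])

-- ===== PORT B =====
-- literal port of Source B: build the translation dict over set(strIn), then one mapped pass (translate)
def caseChanger_alt (strIn : String) (caps : Bool) : String :=
  let cs := strIn.toList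
  if caps = true then
    let table : PySem.Dict Int Int :=
      (PySem.Set.ofList cs).foldl (fun d c =>
        if c.toNat > 96 then d.insert (c.toNat : Int) ((c.toNat : Int) - 32) else d) PySem.Dict.empty
    String.ofList (cs.map (fun c => Char.ofNat (table.getD (c.toNat : Int) (c.toNat : Int)).toNat))
  else
    let table : PySem.Dict Int Int :=
      (PySem.Set.ofList cs).foldl (fun d c =>
        if c.toNat < 96 ∧ c.toNat ≠ 32 then d.insert (c.toNat : Int) ((c.toNat : Int) + 32) else d) PySem.Dict.empty
    String.ofList (cs.map (fun c => Char.ofNat (table.getD (c.toNat : Int) (c.toNat : Int)).toNat))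

-- ===== PRECONDITION & SPEC =====
def Spec_caseChanger (strIn : String) (caps : Bool) (out : String) : Prop := out = caseChanger_alt strIn caps
instance (strIn : String) (caps : Bool) (out : String) : Decidable (Spec_caseChanger strIn caps out) := by unfold Spec_caseChanger; infer_instance

-- ===== CLAIM (what is proved, stated in full; the proofs are below) =====
def Claim_equal_caseChanger : Prop := ∀ (strIn : String) (caps : Bool), Dom_caseChanger strIn caps → Spec_caseChanger strIn caps (caseChanger strIn caps)

-- ===== LEMMAS AND PROOFS =====

-- Lookup in a dict built by a filtered-insert loop keyed by ord (ord is injective on Char).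
theorem getD_foldl_filter_insert_ord (p : Char → Prop) [DecidablePred p] (val : Char → Int)
    (L : List Char) (d : PySem.Dict Int Int) (c₀ : Char) (d0 : Int) :
    (L.foldl (fun d c => if p c then d.insert (c.toNat : Int) (val c) else d) d).getD (c₀.toNat : Int) d0
      = if c₀ ∈ L ∧ p c₀ then val c₀ else d.getD (c₀.toNat : Int) d0 := by
  induction L generalizing d with
  | nil => simp
  | cons a L ih =>
    simp only [List.foldl_cons, ih]
    by_cases hmem : c₀ ∈ L ∧ p c₀
    · simp [hmem, List.mem_cons.mpr (Or.inr hmem.1)]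
    · simp only [hmem, if_false]
      by_cases ha : a = c₀
      · subst ha
        by_cases hp : p a
        · simp [hp, PySem.Dict.getD_insert_self]
        · simp [hp]
      · have hne : (c₀.toNat : Int) ≠ (a.toNat : Int) := by
          intro h
          apply ha
          have h' : a.toNat = c₀.toNat := by exact_mod_cast h.symm
          have := congrArg Char.ofNat h'
          rwa [Char.ofNat_toNat, Char.ofNat_toNat] at this
        have hfalse : ¬ ((c₀ = a ∨ c₀ ∈ L) ∧ p c₀) := by
          rintro ⟨h | h, hpc⟩
          · exact ha h.symm
          · exact hmem ⟨h, hpc⟩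
        by_cases hp : p a
        · simp [hp, PySem.Dict.getD_insert, hne, hfalse]
        · simp [hp, hfalse]

-- B's per-character value, for a character of the string.
theorem alt_char_upper (cs : List Char) (c : Char) (hc : c ∈ cs) :
    Char.ofNat ((((PySem.Set.ofList cs).foldl (fun d c =>
        if c.toNat > 96 then d.insert (c.toNat : Int) ((c.toNat : Int) - 32) else d)
        PySem.Dict.empty).getD (c.toNat : Int) (c.toNat : Int)).toNat)
      = if c.toNat > 96 then Char.ofNat (c.toNat - 32) else c := by
  rw [getD_foldl_filter_insert_ord (fun c => c.toNat > 96) (fun c => (c.toNat : Int) - 32)]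
  have hmem : c ∈ PySem.Set.ofList cs := (PySem.Set.mem_ofList cs c).mpr hc
  by_cases h : c.toNat > 96
  · rw [if_pos ⟨hmem, h⟩, if_pos h]
    congr 1
    omega
  · rw [if_neg (fun hc => h hc.2), if_neg h]
    simp [PySem.Dict.getD_empty, Char.ofNat_toNat]

theorem alt_char_lower (cs : List Char) (c : Char) (hc : c ∈ cs) :
    Char.ofNat ((((PySem.Set.ofList cs).foldl (fun d c =>
        if c.toNat < 96 ∧ c.toNat ≠ 32 then d.insert (c.toNat : Int) ((c.toNat : Int) + 32) else d)
        PySem.Dict.empty).getD (c.toNat : Int) (c.toNat : Int)).toNat)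
      = if c.toNat < 96 ∧ c.toNat ≠ 32 then Char.ofNat (c.toNat + 32) else c := by
  rw [getD_foldl_filter_insert_ord (fun c => c.toNat < 96 ∧ c.toNat ≠ 32) (fun c => (c.toNat : Int) + 32)]
  have hmem : c ∈ PySem.Set.ofList cs := (PySem.Set.mem_ofList cs c).mpr hc
  by_cases h : c.toNat < 96 ∧ c.toNat ≠ 32
  · rw [if_pos ⟨hmem, h⟩, if_pos h]
    congr 1
  · rw [if_neg (fun hc => h hc.2), if_neg h]
    simp [PySem.Dict.getD_empty, Char.ofNat_toNat]

-- A's loop over indices is a fold over the characters, which appends one converted char per step.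
theorem caseChanger_eq_map (strIn : String) (caps : Bool) :
    caseChanger strIn caps = String.ofList (strIn.toList.map (fun c =>
      if caps = true then (if c.toNat > 96 then Char.ofNat (c.toNat - 32) else c)
      else (if c.toNat < 96 ∧ c.toNat ≠ 32 then Char.ofNat (c.toNat + 32) else c))) := by
  unfold caseChanger
  cases caps with
  | true =>
    simp only [Bool.true_eq_false, if_false, if_true]
    rw [PySem.Str.len_eq, PySem.List.foldl_pyRange_zero_pyGetD' strIn.toList ' '
        (fun strOut c => if c.toNat > 96 then strOut ++ [Char.ofNat (c.toNat - 32)] else strOut ++ [c])]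
    rw [show (fun (strOut : List Char) (c : Char) =>
          if c.toNat > 96 then strOut ++ [Char.ofNat (c.toNat - 32)] else strOut ++ [c])
        = (fun strOut c => strOut ++ [if c.toNat > 96 then Char.ofNat (c.toNat - 32) else c]) by
      funext strOut c; split <;> rfl]
    rw [PySem.List.foldl_append_singleton_eq_map]
    simp
  | false =>
    simp only [Bool.false_eq_true, if_false, if_true]
    rw [PySem.Str.len_eq, PySem.List.foldl_pyRange_zero_pyGetD' strIn.toList ' '
        (fun strOut c => if c.toNat < 96 ∧ c.toNat ≠ 32 then strOut ++ [Char.ofNat (c.toNat + 32)] else strOut ++ [c])]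
    rw [show (fun (strOut : List Char) (c : Char) =>
          if c.toNat < 96 ∧ c.toNat ≠ 32 then strOut ++ [Char.ofNat (c.toNat + 32)] else strOut ++ [c])
        = (fun strOut c => strOut ++ [if c.toNat < 96 ∧ c.toNat ≠ 32 then Char.ofNat (c.toNat + 32) else c]) by
      funext strOut c; split <;> rfl]
    rw [PySem.List.foldl_append_singleton_eq_map]
    simp

-- ===== VERDICT (by name: the statement is the Claim_ definition above) =====
theorem caseChanger_spec : Claim_equal_caseChanger := by
  intro strIn caps _
  unfold Spec_caseChanger caseChanger_alt
  rw [caseChanger_eq_map]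
  cases caps with
  | true =>
    simp only [if_true]
    congr 1
    exact List.map_congr_left (fun c hc => (alt_char_upper strIn.toList c hc).symm)
  | false =>
    simp only [Bool.false_eq_true, if_false]
    congr 1
    exact List.map_congr_left (fun c hc => (alt_char_lower strIn.toList c hc).symm)
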